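-- pv_equiv track=rewrite | github.com/magicbuka/python_projects | 28_survived/TransformTransform.py | Transform
-- ===== SOURCE A (Python) =====
-- def Transform(A):
--     B = []
--     N = len(A)
--     for i in range(0, N):
--         for j in range(0, N-i):
--             k = i + j
--             sub_A = A[j:k+1]
--             if sub_A:
--                 B.append(max(sub_A))
--     return B
-- ===== SOURCE B (Python) =====
-- def Transform(A):
--     # Dynamic programming over window length: the maxima of windows of length
--     # d+1 are obtained from those of length d by one zip with A shifted by d.
--     B = []
--     row = list(A)
--     for d in range(1, len(A) + 1):
--         B.extend(row)
--         row = [max(x, y) for x, y in zip(row, A[d:])]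
--     return B
-- ===== Notes on version B (the rewrite author's own statement) =====
-- stated objective: faster
-- what changed: Replaces recomputing max over every slice (O(N^3)) by a length-indexed dynamic programme: the row of window maxima for length d+1 is obtained from the previous row by zipping it with A shifted by d and taking pointwise max.
import Mathlib
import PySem

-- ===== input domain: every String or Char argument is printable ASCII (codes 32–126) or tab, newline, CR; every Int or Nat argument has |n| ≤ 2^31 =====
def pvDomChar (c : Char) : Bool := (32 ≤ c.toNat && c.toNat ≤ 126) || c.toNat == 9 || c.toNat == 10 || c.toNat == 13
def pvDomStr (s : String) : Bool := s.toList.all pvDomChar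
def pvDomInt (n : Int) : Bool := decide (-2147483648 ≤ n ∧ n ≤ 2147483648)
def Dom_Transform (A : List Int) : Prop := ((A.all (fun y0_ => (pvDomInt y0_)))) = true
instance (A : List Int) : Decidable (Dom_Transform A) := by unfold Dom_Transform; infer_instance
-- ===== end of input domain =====

-- B replaces A's O(N^3) recomputation of each window maximum by a length-indexed
-- dynamic programme (row for length d+1 = pointwise max of previous row and A shifted by d); proved equal.


-- ===== PORT A =====
-- literal port of A: for each i, for each j, take the slice A[j:i+j+1] and append its max
-- (Python max(x::t) = t.foldl max x, cf. PySem.List.max?_id_cons)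
def Transform (A : List Int) : List Int :=
  (PySem.List.pyRange 0 (A.length : Int) 1).foldl (fun B i =>
    (PySem.List.pyRange 0 ((A.length : Int) - i) 1).foldl (fun B j =>
      match PySem.List.slice A (some j) (some (i + j + 1)) with
      | [] => B
      | x :: t => B ++ [t.foldl max x]) B) []

-- ===== PORT B =====
-- literal port of B: fold over d = 1..N carrying (B, row); extend B by row, update row by zip/max
def Transform_alt (A : List Int) : List Int :=
  ((PySem.List.pyRange 1 ((A.length : Int) + 1) 1).foldl
    (fun s d =>
      (s.1 ++ s.2,
       (s.2.zip (PySem.List.slice A (some d) none)).map (fun p => max p.1 p.2)))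
    (([] : List Int), A)).1

-- ===== PRECONDITION & SPEC =====
def Spec_Transform (A : List Int) (out : List Int) : Prop := out = Transform_alt A
instance (A : List Int) (out : List Int) : Decidable (Spec_Transform A out) := by unfold Spec_Transform; infer_instance

-- ===== CLAIM (what is proved, stated in full; the proofs are below) =====
def Claim_equal_Transform : Prop := ∀ (A : List Int), Dom_Transform A → Spec_Transform A (Transform A)

-- ===== LEMMAS AND PROOFS =====

-- max of the window of length L starting at j (seeded with A[j], harmless duplicate)
def wmax (A : List Int) (j L : Nat) : Int := ((A.drop j).take L).foldl max (A.getD j 0)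

-- the row of all window maxima of length L
def rowL (A : List Int) (L : Nat) : List Int := (List.range (A.length + 1 - L)).map (fun j => wmax A j L)

theorem rowL_one (A : List Int) : rowL A 1 = A := by
  apply List.ext_getElem
  · simp [rowL]
  · intro j h1 h2
    simp only [rowL, List.getElem_map, List.getElem_range, wmax]
    have hj : j < A.length := h2
    rw [List.drop_eq_getElem_cons hj]
    show List.foldl max (A.getD j 0) (List.take (0 + 1) _) = A[j]
    simp only [List.take_succ_cons, List.take_zero, List.foldl_cons, List.foldl_nil]
    simp [List.getD_eq_getElem?_getD, List.getElem?_eq_getElem hj]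

theorem wmax_succ (A : List Int) (j L : Nat) (h : j + L < A.length) :
    wmax A j (L + 1) = max (wmax A j L) (A.getD (j + L) 0) := by
  have hL : L < (A.drop j).length := by simp; omega
  rw [wmax, List.take_add_one, List.getElem?_eq_getElem hL]
  simp only [List.getElem_drop]
  rw [List.foldl_append]
  simp [wmax, List.getD_eq_getElem?_getD, List.getElem?_eq_getElem h]

theorem row_step (A : List Int) (d : Nat) (_hd : 1 ≤ d) :
    ((rowL A d).zip (A.drop d)).map (fun p => max p.1 p.2) = rowL A (d + 1) := by
  apply List.ext_getElem
  · simp [rowL]; omega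
  · intro j h1 h2
    have h2' : j < A.length + 1 - (d + 1) := by simpa [rowL] using h2
    have hj : j < A.length - d := by omega
    have hjd : j + d < A.length := by omega
    simp only [List.getElem_map, List.getElem_zip, rowL, List.getElem_range, List.getElem_drop]
    rw [wmax_succ A j d hjd]
    congr 1
    simp [List.getD_eq_getElem?_getD, List.getElem?_eq_getElem hjd, Nat.add_comm d j]

-- the common reference value: rows of window maxima, lengths 1..N, concatenated
theorem transform_eq (A : List Int) :
    Transform A = (List.range A.length).flatMap (fun i => rowL A (i + 1)) := by
  unfold Transform
  rw [PySem.List.pyRange_one]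
  simp only [Int.sub_zero, Int.toNat_natCast, List.foldl_map, Int.zero_add]
  rw [PySem.List.foldl_congr_mem (g := fun (B : List Int) (i : Nat) => B ++ rowL A (i + 1))]
  · rw [PySem.List.foldl_append_eq_flatMap]
    simp
  · intro B i hi
    have hi' : i < A.length := List.mem_range.mp hi
    have hcast : ((A.length : Int) - (i : Int)) = ((A.length - i : Nat) : Int) := by
      omega
    rw [hcast, PySem.List.pyRange_one]
    simp only [Int.sub_zero, Int.toNat_natCast, List.foldl_map, Int.zero_add]
    rw [PySem.List.foldl_congr_mem (g := fun (B : List Int) (j : Nat) => B ++ [wmax A j (i + 1)])]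
    · rw [PySem.List.foldl_append_singleton_eq_map, rowL]
      have hn : A.length + 1 - (i + 1) = A.length - i := by omega
      rw [hn]
    · intro B j hj
      have hjA : j < A.length := by
        have := List.mem_range.mp hj; omega
      have hb : (i : Int) + (j : Int) + 1 = (j : Int) + ((i + 1 : Nat) : Int) := by
        push_cast; ring
      rw [hb, PySem.List.slice_natCast_add, List.drop_eq_getElem_cons hjA]
      simp only [List.take_succ_cons]
      have hg : A.getD j 0 = A[j] := by
        simp [List.getD_eq_getElem?_getD, List.getElem?_eq_getElem hjA]
      have hw : wmax A j (i + 1) = ((A.drop (j + 1)).take i).foldl max A[j] := by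
        rw [wmax, List.drop_eq_getElem_cons hjA, List.take_succ_cons, List.foldl_cons, hg,
          max_self]
      rw [hw]

theorem alt_eq (A : List Int) :
    Transform_alt A = (List.range A.length).flatMap (fun i => rowL A (i + 1)) := by
  unfold Transform_alt
  rw [PySem.List.pyRange_one]
  have hlen : (((A.length : Int) + 1) - 1).toNat = A.length := by omega
  rw [hlen]
  simp only [List.foldl_map]
  have key : ∀ t : Nat,
      (List.range t).foldl
        (fun (s : List Int × List Int) (k : Nat) =>
          (s.1 ++ s.2,
           (s.2.zip (PySem.List.slice A (some ((1:Int) + k)) none)).map (fun p => max p.1 p.2)))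
        (([] : List Int), A)
      = ((List.range t).flatMap (fun i => rowL A (i + 1)), rowL A (t + 1)) := by
    intro t
    induction t with
    | zero => simp [rowL_one]
    | succ n ih =>
      rw [List.range_succ, List.foldl_append, ih]
      simp only [List.foldl_cons, List.foldl_nil]
      have hsl : PySem.List.slice A (some ((1:Int) + n)) none = A.drop (n + 1) := by
        have h1 : ((1:Int) + n) = ((n + 1 : Nat) : Int) := by push_cast; ring
        rw [h1, PySem.List.slice_from_natCast]
      rw [hsl, row_step A (n + 1) (by omega)]
      simp
  rw [key]

-- ===== VERDICT (by name: the statement is the Claim_ definition above) =====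
theorem Transform_spec : Claim_equal_Transform := by
  intro A _
  unfold Spec_Transform
  rw [transform_eq, alt_eq]
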